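-- pv_equiv track=rewrite | github.com/gwy15/leetcode | src/乐扣杯/1. 速算机器人.py | calculate
-- ===== SOURCE A (Python) =====
-- def calculate(s: str) -> int:
--     x, y = 1, 0
--     for ch in s:
--         if ch == 'A':
--             x = 2 * x + y
--         elif ch == 'B':
--             y = 2 * y + x
--     return x + y
-- ===== SOURCE B (Python) =====
-- def calculate(s: str) -> int:
--     c = sum(1 for ch in s if ch == 'A' or ch == 'B')
--     return 1 << c
-- ===== Notes on version B (the rewrite author's own statement) =====
-- stated objective: simpler
-- what changed: Replaces the two-variable (x,y) simulation with counting the 'A'/'B' characters and returning the closed form 1 << c, using that x+y doubles on each such character.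
import Mathlib
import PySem

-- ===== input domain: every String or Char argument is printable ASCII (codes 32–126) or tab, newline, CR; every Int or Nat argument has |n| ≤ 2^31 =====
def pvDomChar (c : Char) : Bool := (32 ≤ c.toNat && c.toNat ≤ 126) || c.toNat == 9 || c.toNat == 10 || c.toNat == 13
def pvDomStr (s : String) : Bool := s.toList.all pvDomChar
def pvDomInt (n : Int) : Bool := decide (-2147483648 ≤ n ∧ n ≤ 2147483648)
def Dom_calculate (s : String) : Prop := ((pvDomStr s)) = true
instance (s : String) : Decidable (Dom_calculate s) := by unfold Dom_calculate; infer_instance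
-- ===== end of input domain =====

-- B replaces the (x,y) simulation by counting the A/B characters and returning 1 <<< c (simpler closed form).
-- ===== PORT A =====
def calculateLoop (cs : List Char) (x y : Int) : Int × Int :=
  match cs with
  | [] => (x, y)
  | ch :: rest =>
    if ch = 'A' then calculateLoop rest (2 * x + y) y
    else if ch = 'B' then calculateLoop rest x (2 * y + x)
    else calculateLoop rest x y

def calculate (s : String) : Int :=
  let p := calculateLoop s.toList 1 0
  p.1 + p.2

-- ===== PORT B =====
def calculate_alt (s : String) : Int :=
  let c := (s.toList.filter (fun ch => ch = 'A' ∨ ch = 'B')).length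
  (1 : Int) <<< c

-- ===== PRECONDITION & SPEC =====
def Spec_calculate (s : String) (out : Int) : Prop := out = calculate_alt s
instance (s : String) (out : Int) : Decidable (Spec_calculate s out) := by unfold Spec_calculate; infer_instance

-- ===== CLAIM (what is proved, stated in full; the proofs are below) =====
def Claim_equal_calculate : Prop := ∀ (s : String), Dom_calculate s → Spec_calculate s (calculate s)

-- ===== LEMMAS AND PROOFS =====

-- ===== VERDICT (by name: the statement is the Claim_ definition above) =====
theorem loop_sum (cs : List Char) : ∀ x y : Int,
    (calculateLoop cs x y).1 + (calculateLoop cs x y).2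
      = (x + y) * 2 ^ (cs.filter (fun ch => ch = 'A' ∨ ch = 'B')).length := by
  induction cs with
  | nil => intro x y; simp [calculateLoop]
  | cons ch rest ih =>
    intro x y
    by_cases hA : ch = 'A'
    · simp [calculateLoop, hA, List.filter, ih]; ring
    · by_cases hB : ch = 'B'
      · simp [calculateLoop, hB, List.filter, ih]; ring
      · simp [calculateLoop, hA, hB, List.filter, ih]

theorem calculate_spec : Claim_equal_calculate := by
  intro s _
  unfold Spec_calculate calculate calculate_alt
  rw [loop_sum]
  simp [Int.shiftLeft_eq]
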